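-- pv_equiv track=rewrite | github.com/pypi-data/pypi-mirror-350 | packages/garjus/garjus-1.3.8.tar.gz/garjus-1.3.8/garjus/progress/report.py | _filter_scantypes
-- ===== SOURCE A (Python) =====
-- def _filter_scantypes(scantypes):
--
--     # Try to filter out junk
--     scantypes = [x for x in scantypes if not x.startswith('[')]
--     scantypes = [x for x in scantypes if 'survey' not in x.lower()]
--     scantypes = [x for x in scantypes if x.lower() != 'cor']
--     scantypes = [x for x in scantypes if x.lower() != 'unknown']
--     scantypes = [x for x in scantypes if x.lower() != 'fmri_rest_fsa']
--     scantypes = [x for x in scantypes if not x.lower().startswith('screen')]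
--     scantypes = [x for x in scantypes if not x.startswith('Low Dose CT')]
--     scantypes = [x for x in scantypes if not x.startswith('VWIP')]
--     scantypes = [x for x in scantypes if not x.startswith('3DFRP')]
--     scantypes = [x for x in scantypes if not x.startswith('TOPUP')]
--     scantypes = [x for x in scantypes if not x.startswith('localizer')]
--     scantypes = [x for x in scantypes if not x.startswith('Calibration')]
--     scantypes = [x for x in scantypes if not x.endswith('PhysioLog')]
--     scantypes = [x for x in scantypes if not x.endswith('SBRef')]
--     scantypes = [x for x in scantypes if not x.endswith('FSA')]
--     scantypes = [x for x in scantypes if not x.startswith('Cor_')]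
--     scantypes = [x for x in scantypes if not x.startswith('Ax_')]
--     scantypes = [x for x in scantypes if not x.startswith('AXIIAL')]
--     scantypes = [x for x in scantypes if not x.startswith('DTI_1_')]
--     scantypes = [x for x in scantypes if 'MDDW' not in x]
--     scantypes = [x for x in scantypes if not x.startswith('3-Plane')]
--     scantypes = [x for x in scantypes if not x.startswith('DTI_96d')]
--     scantypes = [x for x in scantypes if not x.startswith('Head-Low')]
--     scantypes = [x for x in scantypes if not x.startswith('MultiP')]
--     scantypes = [x for x in scantypes if not x.startswith('MPRAGE A')]
--     scantypes = [x for x in scantypes if not x.startswith('CTAC2mm')]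
--     scantypes = [x for x in scantypes if not x.startswith('ORIG')]
--     scantypes = [x for x in scantypes if not x.startswith('Phoenix')]
--     scantypes = [x for x in scantypes if not x.startswith('SpinEcho')]
--     scantypes = [x for x in scantypes if not x.startswith('rsfMRI')]
--     scantypes = [x for x in scantypes if not x.startswith('Sagittal_3D_F')]
--     scantypes = [x for x in scantypes if not x.startswith('fMRI_rest')]
--     scantypes = [x for x in scantypes if not x.startswith('DTI_2min_b1000a')]
--     scantypes = [x for x in scantypes if not x.startswith('DTI_2min_b1000a')]
--     scantypes = [x for x in scantypes if not x.startswith('DTI_b0')]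
--
--     return scantypes
-- ===== SOURCE B (Python) =====
-- # One uniform rule table (kind, case_insensitive, pattern), interpreted by a
-- # single generic matcher in one explicit accumulator loop over the input.
-- _RULES = (
--     ('prefix',   False, '['),
--     ('contains', True,  'survey'),
--     ('exact',    True,  'cor'),
--     ('exact',    True,  'unknown'),
--     ('exact',    True,  'fmri_rest_fsa'),
--     ('prefix',   True,  'screen'),
--     ('prefix',   False, 'Low Dose CT'),
--     ('prefix',   False, 'VWIP'),
--     ('prefix',   False, '3DFRP'),
--     ('prefix',   False, 'TOPUP'),
--     ('prefix',   False, 'localizer'),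
--     ('prefix',   False, 'Calibration'),
--     ('suffix',   False, 'PhysioLog'),
--     ('suffix',   False, 'SBRef'),
--     ('suffix',   False, 'FSA'),
--     ('prefix',   False, 'Cor_'),
--     ('prefix',   False, 'Ax_'),
--     ('prefix',   False, 'AXIIAL'),
--     ('prefix',   False, 'DTI_1_'),
--     ('contains', False, 'MDDW'),
--     ('prefix',   False, '3-Plane'),
--     ('prefix',   False, 'DTI_96d'),
--     ('prefix',   False, 'Head-Low'),
--     ('prefix',   False, 'MultiP'),
--     ('prefix',   False, 'MPRAGE A'),
--     ('prefix',   False, 'CTAC2mm'),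
--     ('prefix',   False, 'ORIG'),
--     ('prefix',   False, 'Phoenix'),
--     ('prefix',   False, 'SpinEcho'),
--     ('prefix',   False, 'rsfMRI'),
--     ('prefix',   False, 'Sagittal_3D_F'),
--     ('prefix',   False, 'fMRI_rest'),
--     ('prefix',   False, 'DTI_2min_b1000a'),
--     ('prefix',   False, 'DTI_b0'),
-- )
--
--
-- def _match(kind, ci, pat, x):
--     t = x.lower() if ci else x
--     if kind == 'prefix':
--         return t.startswith(pat)
--     if kind == 'suffix':
--         return t.endswith(pat)
--     if kind == 'contains':
--         return pat in t
--     return t == pat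
--
--
-- def _filter_scantypes(scantypes):
--     out = []
--     for x in scantypes:
--         if not any(_match(k, c, p, x) for k, c, p in _RULES):
--             out.append(x)
--     return out
-- ===== Notes on version B (the rewrite author's own statement) =====
-- stated objective: alternative
-- what changed: Replaces A's 35 hard-coded sequential list-comprehension passes with a declarative rule table of (kind, case-insensitive, pattern) triples interpreted by one generic matcher, applied in a single explicit accumulator loop over the input.
import Mathlib
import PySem

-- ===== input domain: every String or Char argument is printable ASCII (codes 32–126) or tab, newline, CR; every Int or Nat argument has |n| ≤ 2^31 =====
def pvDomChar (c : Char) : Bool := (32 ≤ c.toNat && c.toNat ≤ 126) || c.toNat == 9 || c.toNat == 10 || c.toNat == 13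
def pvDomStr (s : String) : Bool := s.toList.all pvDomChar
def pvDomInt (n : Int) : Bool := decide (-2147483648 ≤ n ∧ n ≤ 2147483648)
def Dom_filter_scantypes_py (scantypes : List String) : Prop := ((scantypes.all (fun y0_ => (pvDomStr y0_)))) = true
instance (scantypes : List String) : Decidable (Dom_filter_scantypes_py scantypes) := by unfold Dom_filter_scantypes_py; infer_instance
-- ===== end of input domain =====

-- B replaces A's 35 hard-coded sequential comprehension passes with a declarative
-- rule table interpreted by one generic matcher in a single accumulator loop;
-- objective: alternative.

-- ===== PORT A =====
def filter_scantypes_py (scantypes : List String) : List String :=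
  let s := scantypes.filter (fun x => !(PySem.Str.startswith x "["))
  let s := s.filter (fun x => !(PySem.Str.isIn "survey" (PySem.Str.lower x)))
  let s := s.filter (fun x => !(PySem.Str.lower x == "cor"))
  let s := s.filter (fun x => !(PySem.Str.lower x == "unknown"))
  let s := s.filter (fun x => !(PySem.Str.lower x == "fmri_rest_fsa"))
  let s := s.filter (fun x => !(PySem.Str.startswith (PySem.Str.lower x) "screen"))
  let s := s.filter (fun x => !(PySem.Str.startswith x "Low Dose CT"))
  let s := s.filter (fun x => !(PySem.Str.startswith x "VWIP"))
  let s := s.filter (fun x => !(PySem.Str.startswith x "3DFRP"))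
  let s := s.filter (fun x => !(PySem.Str.startswith x "TOPUP"))
  let s := s.filter (fun x => !(PySem.Str.startswith x "localizer"))
  let s := s.filter (fun x => !(PySem.Str.startswith x "Calibration"))
  let s := s.filter (fun x => !(PySem.Str.endswith x "PhysioLog"))
  let s := s.filter (fun x => !(PySem.Str.endswith x "SBRef"))
  let s := s.filter (fun x => !(PySem.Str.endswith x "FSA"))
  let s := s.filter (fun x => !(PySem.Str.startswith x "Cor_"))
  let s := s.filter (fun x => !(PySem.Str.startswith x "Ax_"))
  let s := s.filter (fun x => !(PySem.Str.startswith x "AXIIAL"))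
  let s := s.filter (fun x => !(PySem.Str.startswith x "DTI_1_"))
  let s := s.filter (fun x => !(PySem.Str.isIn "MDDW" x))
  let s := s.filter (fun x => !(PySem.Str.startswith x "3-Plane"))
  let s := s.filter (fun x => !(PySem.Str.startswith x "DTI_96d"))
  let s := s.filter (fun x => !(PySem.Str.startswith x "Head-Low"))
  let s := s.filter (fun x => !(PySem.Str.startswith x "MultiP"))
  let s := s.filter (fun x => !(PySem.Str.startswith x "MPRAGE A"))
  let s := s.filter (fun x => !(PySem.Str.startswith x "CTAC2mm"))
  let s := s.filter (fun x => !(PySem.Str.startswith x "ORIG"))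
  let s := s.filter (fun x => !(PySem.Str.startswith x "Phoenix"))
  let s := s.filter (fun x => !(PySem.Str.startswith x "SpinEcho"))
  let s := s.filter (fun x => !(PySem.Str.startswith x "rsfMRI"))
  let s := s.filter (fun x => !(PySem.Str.startswith x "Sagittal_3D_F"))
  let s := s.filter (fun x => !(PySem.Str.startswith x "fMRI_rest"))
  let s := s.filter (fun x => !(PySem.Str.startswith x "DTI_2min_b1000a"))
  let s := s.filter (fun x => !(PySem.Str.startswith x "DTI_2min_b1000a"))
  let s := s.filter (fun x => !(PySem.Str.startswith x "DTI_b0"))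
  s

-- ===== PORT B =====
-- the rule table: (kind, case_insensitive, pattern)
def pvRules : List (String × Bool × String) :=
  [("prefix",   false, "["),
   ("contains", true,  "survey"),
   ("exact",    true,  "cor"),
   ("exact",    true,  "unknown"),
   ("exact",    true,  "fmri_rest_fsa"),
   ("prefix",   true,  "screen"),
   ("prefix",   false, "Low Dose CT"),
   ("prefix",   false, "VWIP"),
   ("prefix",   false, "3DFRP"),
   ("prefix",   false, "TOPUP"),
   ("prefix",   false, "localizer"),
   ("prefix",   false, "Calibration"),
   ("suffix",   false, "PhysioLog"),
   ("suffix",   false, "SBRef"),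
   ("suffix",   false, "FSA"),
   ("prefix",   false, "Cor_"),
   ("prefix",   false, "Ax_"),
   ("prefix",   false, "AXIIAL"),
   ("prefix",   false, "DTI_1_"),
   ("contains", false, "MDDW"),
   ("prefix",   false, "3-Plane"),
   ("prefix",   false, "DTI_96d"),
   ("prefix",   false, "Head-Low"),
   ("prefix",   false, "MultiP"),
   ("prefix",   false, "MPRAGE A"),
   ("prefix",   false, "CTAC2mm"),
   ("prefix",   false, "ORIG"),
   ("prefix",   false, "Phoenix"),
   ("prefix",   false, "SpinEcho"),
   ("prefix",   false, "rsfMRI"),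
   ("prefix",   false, "Sagittal_3D_F"),
   ("prefix",   false, "fMRI_rest"),
   ("prefix",   false, "DTI_2min_b1000a"),
   ("prefix",   false, "DTI_b0")]

-- the generic matcher (`_match` in Source B)
def pvMatch (kind : String) (ci : Bool) (pat : String) (x : String) : Bool :=
  let t := if ci then PySem.Str.lower x else x
  if kind == "prefix" then PySem.Str.startswith t pat
  else if kind == "suffix" then PySem.Str.endswith t pat
  else if kind == "contains" then PySem.Str.isIn pat t
  else t == pat

-- the accumulator loop of Source B (out.append ⇝ structural recursion)
def pvFilterLoop : List String → List String
  | [] => []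
  | x :: rest =>
      if pvRules.any (fun r => pvMatch r.1 r.2.1 r.2.2 x) then pvFilterLoop rest
      else x :: pvFilterLoop rest

def filter_scantypes_py_alt (scantypes : List String) : List String :=
  pvFilterLoop scantypes

-- ===== PRECONDITION & SPEC =====
def Spec_filter_scantypes_py (scantypes : List String) (out : List String) : Prop := out = filter_scantypes_py_alt scantypes
instance (scantypes : List String) (out : List String) : Decidable (Spec_filter_scantypes_py scantypes out) := by unfold Spec_filter_scantypes_py; infer_instance

-- ===== CLAIM (what is proved, stated in full; the proofs are below) =====
def Claim_equal_filter_scantypes_py : Prop := ∀ (scantypes : List String), Dom_filter_scantypes_py scantypes → Spec_filter_scantypes_py scantypes (filter_scantypes_py scantypes)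

-- ===== LEMMAS AND PROOFS =====
-- the loop is the filter by the negated rule-table match
theorem pvFilterLoop_eq_filter (xs : List String) :
    pvFilterLoop xs = xs.filter (fun x => !(pvRules.any (fun r => pvMatch r.1 r.2.1 r.2.2 x))) := by
  induction xs with
  | nil => rfl
  | cons x rest ih =>
      simp only [pvFilterLoop, List.filter_cons]
      by_cases h : pvRules.any (fun r => pvMatch r.1 r.2.1 r.2.2 x) = true
      · simp [h, ih]
      · simp [h, ih]

theorem pvOrIdem (a b : Bool) : (a || (a || b)) = (a || b) := by
  cases a <;> simp

-- the two keep-predicates agree on every string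
theorem pvKeep_eq (x : String) :
    (!(PySem.Str.startswith x "DTI_b0") &&
     (!(PySem.Str.startswith x "DTI_2min_b1000a") &&
     (!(PySem.Str.startswith x "DTI_2min_b1000a") &&
     (!(PySem.Str.startswith x "fMRI_rest") &&
     (!(PySem.Str.startswith x "Sagittal_3D_F") &&
     (!(PySem.Str.startswith x "rsfMRI") &&
     (!(PySem.Str.startswith x "SpinEcho") &&
     (!(PySem.Str.startswith x "Phoenix") &&
     (!(PySem.Str.startswith x "ORIG") &&
     (!(PySem.Str.startswith x "CTAC2mm") &&
     (!(PySem.Str.startswith x "MPRAGE A") &&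
     (!(PySem.Str.startswith x "MultiP") &&
     (!(PySem.Str.startswith x "Head-Low") &&
     (!(PySem.Str.startswith x "DTI_96d") &&
     (!(PySem.Str.startswith x "3-Plane") &&
     (!(PySem.Str.isIn "MDDW" x) &&
     (!(PySem.Str.startswith x "DTI_1_") &&
     (!(PySem.Str.startswith x "AXIIAL") &&
     (!(PySem.Str.startswith x "Ax_") &&
     (!(PySem.Str.startswith x "Cor_") &&
     (!(PySem.Str.endswith x "FSA") &&
     (!(PySem.Str.endswith x "SBRef") &&
     (!(PySem.Str.endswith x "PhysioLog") &&
     (!(PySem.Str.startswith x "Calibration") &&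
     (!(PySem.Str.startswith x "localizer") &&
     (!(PySem.Str.startswith x "TOPUP") &&
     (!(PySem.Str.startswith x "3DFRP") &&
     (!(PySem.Str.startswith x "VWIP") &&
     (!(PySem.Str.startswith x "Low Dose CT") &&
     (!(PySem.Str.startswith (PySem.Str.lower x) "screen") &&
     (!(PySem.Str.lower x == "fmri_rest_fsa") &&
     (!(PySem.Str.lower x == "unknown") &&
     (!(PySem.Str.lower x == "cor") &&
     (!(PySem.Str.isIn "survey" (PySem.Str.lower x)) &&
     !(PySem.Str.startswith x "[")))))))))))))))))))))))))))))))))))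
    = !(pvRules.any (fun r => pvMatch r.1 r.2.1 r.2.2 x)) := by
  simp only [pvRules, pvMatch, List.any_cons, List.any_nil, Bool.or_false, String.reduceBEq,
    if_true, if_false, Bool.false_eq_true]
  simp only [← Bool.not_or]
  congr 1
  rw [pvOrIdem]
  ac_rfl

-- ===== VERDICT (by name: the statement is the Claim_ definition above) =====
theorem filter_scantypes_py_spec : Claim_equal_filter_scantypes_py := by
  intro scantypes _
  unfold Spec_filter_scantypes_py filter_scantypes_py filter_scantypes_py_alt
  rw [pvFilterLoop_eq_filter]
  simp only [List.filter_filter]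
  exact List.filter_congr (fun x _ => pvKeep_eq x)
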